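-- pv_equiv track=rewrite | github.com/EunBinChoi/Algorithms-Solution-master | Programmers/stage1/budget-v1.0/budget.py | solution
-- ===== SOURCE A (Python) =====
-- from typing import List
-- from itertools import combinations
--
-- def solution(d: List[int], budget: int) -> int:
--     max_d = 0
--     for i in range(1, len(d)+1):
--         li = list(combinations(d, i))
--         for e in li:
--             if sum(e) == budget:
--                 max_d = max(max_d, len(e))
--                 break
--     return max_d
-- ===== SOURCE B (Python) =====
-- from typing import List
--
-- def solution(d: List[int], budget: int) -> int:
--     # subset-sum DP: for each reachable sum, keep the max number of items achieving it
--     best = {0: 0}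
--     for x in d:
--         nxt = dict(best)
--         for s, c in best.items():
--             t = s + x
--             if nxt.get(t, -1) < c + 1:
--                 nxt[t] = c + 1
--         best = nxt
--     return best.get(budget, 0)
-- ===== Notes on version B (the rewrite author's own statement) =====
-- stated objective: alternative
-- what changed: Replaces A's enumeration of all 2^n combinations of every size with a one-pass subset-sum dynamic programme over a dict mapping each reachable sum to the maximum number of items achieving it (much faster when values are small or collide, e.g. typical budget data, though with n arbitrary 32-bit values the number of distinct sums can itself grow exponentially).
import Mathlib
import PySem

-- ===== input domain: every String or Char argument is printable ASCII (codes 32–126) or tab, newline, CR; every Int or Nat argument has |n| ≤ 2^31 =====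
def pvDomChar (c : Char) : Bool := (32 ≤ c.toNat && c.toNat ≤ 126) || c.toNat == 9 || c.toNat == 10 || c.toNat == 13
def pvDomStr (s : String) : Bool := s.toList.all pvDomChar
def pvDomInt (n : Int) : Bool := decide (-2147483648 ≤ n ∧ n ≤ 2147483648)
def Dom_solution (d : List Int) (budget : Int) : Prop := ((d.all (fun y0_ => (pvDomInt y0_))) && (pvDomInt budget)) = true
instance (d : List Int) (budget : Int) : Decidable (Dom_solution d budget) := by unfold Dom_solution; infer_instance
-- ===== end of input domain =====

-- B replaces A's enumeration of all 2^n combinations by a subset-sum dynamic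
-- programme (dict: reachable sum ↦ max item count), a structurally different exact algorithm.


-- ===== PORT A =====
-- one pass of A's outer loop: 'li = list(combinations(d, i)); for e in li: if sum(e) == budget: max_d = max(max_d, len(e)); break'.
-- itertools.combinations(d, i) is ported as the library function List.sublistsLen i d (the same
-- length-i subsequences; only their existence and the length of a match are used downstream);
-- the inner for-with-break is the first match, List.find?.
def aStep (d : List Int) (budget : Int) (max_d i : Int) : Int :=
  match (List.sublistsLen i.toNat d).find? (fun e => e.sum == budget) with
  | some e => max max_d (e.length : Int)
  | none => max_d

def solution (d : List Int) (budget : Int) : Int :=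
  (PySem.List.pyRange 1 ((d.length : Int) + 1) 1).foldl (aStep d budget) 0

-- ===== PORT B =====
-- body of B's inner loop: 't = s + x; if nxt.get(t, -1) < c + 1: nxt[t] = c + 1'  (p = (s, c))
def bStep (x : Int) (nxt : PySem.Dict Int Int) (p : Int × Int) : PySem.Dict Int Int :=
  if nxt.getD (p.1 + x) (-1) < p.2 + 1 then nxt.insert (p.1 + x) (p.2 + 1) else nxt

def solution_alt (d : List Int) (budget : Int) : Int :=
  (d.foldl (fun best x => best.items.foldl (bStep x) best)
      (PySem.Dict.empty.insert 0 0)).getD budget 0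

-- ===== PRECONDITION & SPEC =====
def Spec_solution (d : List Int) (budget : Int) (out : Int) : Prop := out = solution_alt d budget
instance (d : List Int) (budget : Int) (out : Int) : Decidable (Spec_solution d budget out) := by unfold Spec_solution; infer_instance

-- ===== CLAIM (what is proved, stated in full; the proofs are below) =====
def Claim_equal_solution : Prop := ∀ (d : List Int) (budget : Int), Dom_solution d budget → Spec_solution d budget (solution d budget)

-- ===== LEMMAS AND PROOFS =====

-- the value both programs compute: the greatest length of a subsequence of d summing to budget, 0 if none
def Ans (d : List Int) (b v : Int) : Prop :=
  0 ≤ v ∧ (v = 0 ∨ ∃ e : List Int, e.Sublist d ∧ e.sum = b ∧ (e.length : Int) = v) ∧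
    ∀ e : List Int, e.Sublist d → e.sum = b → (e.length : Int) ≤ v

theorem ans_unique {d : List Int} {b v w : Int} (hv : Ans d b v) (hw : Ans d b w) : v = w := by
  obtain ⟨hv0, hvw, hvb⟩ := hv
  obtain ⟨hw0, hww, hwb⟩ := hw
  rcases hvw with rfl | ⟨e, he, hs, hl⟩
  · rcases hww with rfl | ⟨e, he, hs, hl⟩
    · rfl
    · have := hvb e he hs; omega
  · have h1 := hwb e he hs
    rcases hww with rfl | ⟨e', he', hs', hl'⟩
    · omega
    · have h2 := hvb e' he' hs'; omega

theorem sublist_concat {e l : List Int} {x : Int} :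
    e.Sublist (l ++ [x]) ↔ e.Sublist l ∨ ∃ e' : List Int, e = e' ++ [x] ∧ e'.Sublist l := by
  constructor
  · intro h
    rw [List.sublist_append_iff] at h
    obtain ⟨l1, l2, rfl, h1, h2⟩ := h
    rcases List.sublist_singleton.mp h2 with rfl | rfl
    · exact Or.inl (by simpa using h1)
    · exact Or.inr ⟨l1, rfl, h1⟩
  · rintro (h | ⟨e', rfl, h⟩)
    · exact h.trans (List.sublist_append_left l [x])
    · exact h.append (List.Sublist.refl [x])

-- ===== A-side: the range fold computes Ans =====

-- invariant after the loop has run for i = 1 .. m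
def AnsU (d : List Int) (b : Int) (m : Nat) (v : Int) : Prop :=
  0 ≤ v ∧ (v = 0 ∨ ∃ e : List Int, e.Sublist d ∧ e.sum = b ∧ (e.length : Int) = v) ∧
    ∀ e : List Int, e.Sublist d → e.sum = b → e.length ≤ m → (e.length : Int) ≤ v

theorem a_inv (d : List Int) (b : Int) (m : Nat) :
    AnsU d b m ((PySem.List.pyRange 1 ((m : Int) + 1) 1).foldl (aStep d b) 0) := by
  induction m with
  | zero =>
    rw [show ((0 : Nat) : Int) + 1 = 1 by norm_num, PySem.List.pyRange_one_eq_nil (by norm_num)]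
    simp only [List.foldl_nil]
    refine ⟨le_refl 0, Or.inl rfl, fun e _ _ hl => ?_⟩
    have : e.length = 0 := Nat.le_zero.mp hl
    omega
  | succ m ih =>
    rw [show ((m + 1 : Nat) : Int) + 1 = ((m : Int) + 1) + 1 by push_cast; ring,
      PySem.List.pyRange_one_succ_right (by omega), List.foldl_append]
    set acc := (PySem.List.pyRange 1 ((m : Int) + 1) 1).foldl (aStep d b) 0 with hacc
    obtain ⟨h0, hw, hb⟩ := ih
    simp only [List.foldl_cons, List.foldl_nil]
    unfold aStep
    rw [show ((m : Int) + 1).toNat = m + 1 by omega]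
    cases hf : (List.sublistsLen (m + 1) d).find? (fun e => e.sum == b) with
    | some e =>
      rw [show (match some e with
          | some e => max acc ((e.length : Nat) : Int)
          | none => acc) = max acc ((e.length : Nat) : Int) from rfl]
      have hmem := List.mem_of_find?_eq_some hf
      have hsub := (List.mem_sublistsLen.mp hmem).1
      have hlen := (List.mem_sublistsLen.mp hmem).2
      have hsum : e.sum = b := by simpa using List.find?_some hf
      refine ⟨by omega, ?_, ?_⟩
      · rcases le_total acc ((e.length : Int)) with h | h
        · exact Or.inr ⟨e, hsub, hsum, by omega⟩
        · rcases hw with h00 | ⟨e', he', hs', hl'⟩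
          · exact Or.inl (by omega)
          · exact Or.inr ⟨e', he', hs', by omega⟩
      · intro e' he' hs' hl'
        rcases Nat.lt_or_ge e'.length (m + 1) with h | h
        · have := hb e' he' hs' (by omega); omega
        · have : e'.length = m + 1 := by omega
          rw [hlen]; omega
    | none =>
      rw [show (match (none : Option (List Int)) with
          | some e => max acc ((e.length : Nat) : Int)
          | none => acc) = acc from rfl]
      refine ⟨h0, hw, fun e' he' hs' hl' => ?_⟩
      rcases Nat.lt_or_ge e'.length (m + 1) with h | h
      · exact hb e' he' hs' (by omega)
      · have heq : e'.length = m + 1 := by omega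
        have hmem : e' ∈ List.sublistsLen (m + 1) d :=
          List.mem_sublistsLen.mpr ⟨he', heq⟩
        have := List.find?_eq_none.mp hf e' hmem
        simp [hs'] at this

theorem a_sat (d : List Int) (b : Int) : Ans d b (solution d b) := by
  unfold solution
  obtain ⟨h0, hw, hb⟩ := a_inv d b (d.length)
  exact ⟨h0, hw, fun e he hs => hb e he hs he.length_le⟩

-- ===== B-side: the dict fold computes Ans =====

-- what B's dict knows about one sum
def OptBest (o : Option Int) (p : List Int) (s : Int) : Prop :=
  match o with
  | none => ¬ ∃ e : List Int, e.Sublist p ∧ e.sum = s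
  | some v => (∃ e : List Int, e.Sublist p ∧ e.sum = s ∧ (e.length : Int) = v) ∧
      ∀ e : List Int, e.Sublist p → e.sum = s → (e.length : Int) ≤ v

def DInv (p : List Int) (D : PySem.Dict Int Int) : Prop :=
  D.keys.Nodup ∧ ∀ s, OptBest (D.get? s) p s

def omax (o : Option Int) (v : Int) : Int :=
  match o with
  | none => v
  | some u => max u v

theorem nodup_foldl_bStep (x : Int) (L : List (Int × Int)) (A : PySem.Dict Int Int)
    (h : A.keys.Nodup) : ((L.foldl (bStep x) A).keys).Nodup := by
  induction L generalizing A with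
  | nil => simpa using h
  | cons p L ih =>
    simp only [List.foldl_cons]
    apply ih
    unfold bStep
    split
    · exact PySem.Dict.nodup_keys_insert _ _ _ h
    · exact h

theorem get?_foldl_bStep (x : Int) (L : List (Int × Int)) (A : PySem.Dict Int Int)
    (hnd : (L.map Prod.fst).Nodup) (hnn : ∀ p ∈ L, 0 ≤ p.2) (q : Int) :
    (L.foldl (bStep x) A).get? q =
      match L.find? (fun p => p.1 + x == q) with
      | some p => some (omax (A.get? q) (p.2 + 1))
      | none => A.get? q := by
  induction L generalizing A with
  | nil => simp
  | cons p L ih =>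
    obtain ⟨s, c⟩ := p
    simp only [List.map_cons, List.nodup_cons] at hnd
    have hc : (0 : Int) ≤ c := hnn (s, c) (List.mem_cons_self)
    have hnnL : ∀ p ∈ L, (0 : Int) ≤ p.2 := fun p hp => hnn p (List.mem_cons_of_mem _ hp)
    simp only [List.foldl_cons]
    by_cases hq : s + x = q
    · rw [List.find?_cons_of_pos (by simpa using hq)]
      have hnone : L.find? (fun p => p.1 + x == q) = none := by
        apply List.find?_eq_none.mpr
        intro p hp hcon
        have hpx : p.1 + x = q := by simpa using hcon
        exact hnd.1 (by simpa [show p.1 = s by omega] using List.mem_map_of_mem (f := Prod.fst) hp)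
      rw [ih _ hnd.2 hnnL, hnone]
      show (if A.getD (s + x) (-1) < c + 1 then A.insert (s + x) (c + 1) else A).get? q
        = some (omax (A.get? q) (c + 1))
      rw [hq, PySem.Dict.getD_eq_get?_getD]
      cases hA : A.get? q with
      | none =>
        rw [if_pos (by simp only [Option.getD_none]; omega)]
        rw [PySem.Dict.get?_insert_self]
        simp [omax]
      | some u =>
        simp only [Option.getD_some]
        split_ifs with hlt
        · rw [PySem.Dict.get?_insert_self]
          simp only [omax]
          congr 1
          omega
        · rw [hA]
          simp only [omax]
          congr 1
          omega
    · rw [List.find?_cons_of_neg (by simpa using hq)]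
      have hstep : (bStep x A (s, c)).get? q = A.get? q := by
        unfold bStep
        split
        · exact PySem.Dict.get?_insert_of_ne _ _ (fun h => hq (by simp at h; omega))
        · rfl
      rw [ih _ hnd.2 hnnL, hstep]

theorem find?_items (D : PySem.Dict Int Int) (hnd : D.keys.Nodup) (x q : Int) :
    D.items.find? (fun p => p.1 + x == q) = (D.get? (q - x)).map (fun c => (q - x, c)) := by
  cases hD : D.get? (q - x) with
  | none =>
    simp only [Option.map_none]
    apply List.find?_eq_none.mpr
    intro p hp hcon
    have hpx : p.1 + x = q := by simpa using hcon
    have : D.get? p.1 = some p.2 := PySem.Dict.get?_of_mem_items _ (by simpa using hp) hnd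
    rw [show p.1 = q - x by omega, hD] at this
    simp at this
  | some c =>
    have hmem := PySem.Dict.mem_items_of_get?_eq_some _ hD
    cases hf : D.items.find? (fun p => p.1 + x == q) with
    | none =>
      have := List.find?_eq_none.mp hf _ hmem
      simp at this
    | some p0 =>
      have hpred : p0.1 = q - x := by have := List.find?_some hf; simp at this; omega
      have hp0 : D.get? p0.1 = some p0.2 :=
        PySem.Dict.get?_of_mem_items _ (List.mem_of_find?_eq_some hf) hnd
      rw [hpred, hD] at hp0
      simp only [Option.map_some, Option.some.injEq]
      exact Prod.ext hpred (by simpa using hp0.symm)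

theorem dinv_init : DInv [] (PySem.Dict.empty.insert 0 0) := by
  constructor
  · exact PySem.Dict.nodup_keys_insert _ _ _ PySem.Dict.nodup_keys_empty
  · intro s
    by_cases hs : s = 0
    · subst hs
      rw [PySem.Dict.get?_insert_self]
      refine ⟨⟨[], List.Sublist.refl [], rfl, rfl⟩, fun e he _ => ?_⟩
      rw [List.sublist_nil.mp he]; simp
    · rw [PySem.Dict.get?_insert_of_ne _ _ hs, PySem.Dict.get?_empty]
      unfold OptBest
      rintro ⟨e, he, hsum⟩
      rw [List.sublist_nil.mp he] at hsum
      simp at hsum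
      omega

theorem dinv_step (p : List Int) (x : Int) (D : PySem.Dict Int Int) (h : DInv p D) :
    DInv (p ++ [x]) (D.items.foldl (bStep x) D) := by
  obtain ⟨hnd, hopt⟩ := h
  have hndm : (D.items.map Prod.fst).Nodup := hnd
  have hnn : ∀ q ∈ D.items, (0 : Int) ≤ q.2 := by
    intro q hq
    have hget : D.get? q.1 = some q.2 := PySem.Dict.get?_of_mem_items _ hq hnd
    have := hopt q.1
    rw [hget] at this
    obtain ⟨⟨e, _, _, hl⟩, _⟩ := this
    omega
  refine ⟨nodup_foldl_bStep x D.items D hnd, fun q => ?_⟩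
  rw [get?_foldl_bStep x D.items D hndm hnn q, find?_items D hnd x q]
  have hq := hopt q
  have hqx := hopt (q - x)
  cases hD2 : D.get? (q - x) with
  | none =>
    rw [hD2] at hqx
    simp only [Option.map_none]
    cases hD1 : D.get? q with
    | none =>
      rw [hD1] at hq
      unfold OptBest at hq hqx ⊢
      rintro ⟨e, he, hsum⟩
      rcases sublist_concat.mp he with h1 | ⟨e', rfl, h1⟩
      · exact hq ⟨e, h1, hsum⟩
      · exact hqx ⟨e', h1, by simp at hsum; omega⟩
    | some v =>
      rw [hD1] at hq
      unfold OptBest at hq hqx ⊢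
      obtain ⟨⟨e, he, hs, hl⟩, hb⟩ := hq
      refine ⟨⟨e, he.trans (List.sublist_append_left p [x]), hs, hl⟩, ?_⟩
      intro e' he' hs'
      rcases sublist_concat.mp he' with h1 | ⟨e'', rfl, h1⟩
      · exact hb e' h1 hs'
      · exact absurd ⟨e'', h1, by simp at hs'; omega⟩ hqx
  | some c =>
    rw [hD2] at hqx
    unfold OptBest at hqx
    obtain ⟨⟨e0, he0, hs0, hl0⟩, hb0⟩ := hqx
    simp only [Option.map_some]
    have hwit : ((e0 ++ [x]).Sublist (p ++ [x])) ∧ (e0 ++ [x]).sum = q ∧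
        (((e0 ++ [x]).length : Int)) = c + 1 := by
      refine ⟨he0.append (List.Sublist.refl [x]), by simp [hs0], ?_⟩
      simp only [List.length_append, List.length_cons, List.length_nil]
      push_cast
      omega
    cases hD1 : D.get? q with
    | none =>
      rw [hD1] at hq
      unfold OptBest at hq ⊢
      refine ⟨⟨e0 ++ [x], hwit.1, hwit.2.1, by simpa [omax] using hwit.2.2⟩, ?_⟩
      intro e' he' hs'
      rcases sublist_concat.mp he' with h1 | ⟨e'', rfl, h1⟩
      · exact absurd ⟨e', h1, hs'⟩ hq
      · have := hb0 e'' h1 (by simp at hs'; omega)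
        simp only [omax, List.length_append, List.length_cons, List.length_nil]
        push_cast
        omega
    | some v =>
      rw [hD1] at hq
      unfold OptBest at hq ⊢
      obtain ⟨⟨e1, he1, hs1, hl1⟩, hb1⟩ := hq
      constructor
      · rcases le_total v (c + 1) with h | h
        · exact ⟨e0 ++ [x], hwit.1, hwit.2.1, by simp only [omax]; rw [hwit.2.2]; omega⟩
        · exact ⟨e1, he1.trans (List.sublist_append_left p [x]), hs1, by simp only [omax]; omega⟩
      · intro e' he' hs'
        rcases sublist_concat.mp he' with h1 | ⟨e'', rfl, h1⟩
        · have := hb1 e' h1 hs'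
          simp only [omax]; omega
        · have := hb0 e'' h1 (by simp at hs'; omega)
          simp only [omax, List.length_append, List.length_cons, List.length_nil]
          push_cast
          omega

theorem dinv_fold (l p : List Int) (D : PySem.Dict Int Int) (h : DInv p D) :
    DInv (p ++ l) (l.foldl (fun best x => best.items.foldl (bStep x) best) D) := by
  induction l generalizing p D with
  | nil => simpa using h
  | cons x l ih =>
    simp only [List.foldl_cons]
    rw [show p ++ x :: l = (p ++ [x]) ++ l by simp]
    exact ih (p ++ [x]) _ (dinv_step p x D h)

theorem b_sat (d : List Int) (b : Int) : Ans d b (solution_alt d b) := by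
  unfold solution_alt
  have hinv := dinv_fold d [] (PySem.Dict.empty.insert 0 0) dinv_init
  simp only [List.nil_append] at hinv
  obtain ⟨_, hopt⟩ := hinv
  have hO := hopt b
  rw [PySem.Dict.getD_eq_get?_getD]
  cases hg : (d.foldl (fun best x => best.items.foldl (bStep x) best)
      (PySem.Dict.empty.insert 0 0)).get? b with
  | none =>
    rw [hg] at hO
    unfold OptBest at hO
    exact ⟨le_refl 0, Or.inl rfl, fun e he hs => absurd ⟨e, he, hs⟩ hO⟩
  | some v =>
    rw [hg] at hO
    unfold OptBest at hO
    obtain ⟨⟨e, he, hs, hl⟩, hb⟩ := hO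
    simp only [Option.getD_some]
    exact ⟨by omega, Or.inr ⟨e, he, hs, hl⟩, hb⟩

-- ===== VERDICT (by name: the statement is the Claim_ definition above) =====
theorem solution_spec : Claim_equal_solution := by
  intro d budget _
  unfold Spec_solution
  exact ans_unique (a_sat d budget) (b_sat d budget)
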